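-- pv_equiv track=rewrite | github.com/sajal1302/450_DSA | ARRAY/Move all negative elements to end.py | segregateElements
-- ===== SOURCE A (Python) =====
-- def segregateElements(arr, n):
--     # Your code goes here
--     a=[]
--     b=[]
--     c=[]
--     for i in arr:
--         if i > 0:
--             a.append(i)
--         else:
--             b.append(i)
--
--     a.extend(b)
--     for i in range(n):
--         arr[i]=a[i]
--
--     return arr
-- ===== SOURCE B (Python) =====
-- def segregateElements(arr, n):
--     # Idiomatic rewrite: one stable sort on the boolean key (x <= 0) puts the
--     # positives first (in order) then the non-positives (in order); then the
--     # same first-n write-back into arr.  Mutates arr in place, like A.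
--     ordered = sorted(arr, key=lambda x: x <= 0)
--     for i in range(n):
--         arr[i] = ordered[i]
--     return arr
-- ===== Notes on version B (the rewrite author's own statement) =====
-- stated objective: idiomatic
-- what changed: The explicit two-bucket partition loop (append to a or b, then a.extend(b)) is replaced by a single stable sort on the boolean key x <= 0, which yields the same positives-first, order-preserving arrangement.
import Mathlib
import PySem

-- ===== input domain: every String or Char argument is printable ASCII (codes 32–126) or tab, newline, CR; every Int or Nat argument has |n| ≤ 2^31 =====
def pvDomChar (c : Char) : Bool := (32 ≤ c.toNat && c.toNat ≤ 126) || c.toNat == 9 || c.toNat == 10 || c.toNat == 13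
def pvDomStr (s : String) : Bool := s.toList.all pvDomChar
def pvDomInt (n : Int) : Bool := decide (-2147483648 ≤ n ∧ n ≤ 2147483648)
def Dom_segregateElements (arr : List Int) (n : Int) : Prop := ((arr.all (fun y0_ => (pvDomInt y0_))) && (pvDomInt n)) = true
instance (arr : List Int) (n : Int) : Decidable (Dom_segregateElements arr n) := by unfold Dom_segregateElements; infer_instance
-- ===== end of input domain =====

-- B replaces A's two-bucket partition loop by one stable sort on the boolean key
-- (x <= 0) (idiomatic, same cost class); both mutate arr identically in place,
-- and the equivalence is about the returned value.


-- the final 'for i in range(n): arr[i] = a[i]' loop, identical in both Pythons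
-- (arr[i] = … with an out-of-range i raises in Python; such n are outside Pre_)
def pvWriteBack (src : List Int) (arr : List Int) (n : Int) : List Int :=
  (PySem.List.pyRange 0 n 1).foldl
    (fun acc i =>
      match PySem.List.pyGet? src i with
      | some v => acc.set i.toNat v
      | none => acc) arr

-- ===== PORT A =====
def segregateElements (arr : List Int) (n : Int) : List Int :=
  -- a=[]; b=[]; c=[] (c is never used); partition loop, then a.extend(b)
  let ab : List Int × List Int :=
    arr.foldl (fun p i => if 0 < i then (p.1 ++ [i], p.2) else (p.1, p.2 ++ [i])) ([], [])
  let a := ab.1 ++ ab.2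
  pvWriteBack a arr n

-- ===== PORT B =====
def segregateElements_alt (arr : List Int) (n : Int) : List Int :=
  let ordered := PySem.List.sorted arr (fun x => decide (x ≤ 0))
  pvWriteBack ordered arr n

-- ===== PRECONDITION & SPEC =====
-- Pre_ excludes exactly n > len(arr), where A's write loop raises IndexError.
def Pre_segregateElements (arr : List Int) (n : Int) : Prop := n ≤ (arr.length : Int)
instance (arr : List Int) (n : Int) : Decidable (Pre_segregateElements arr n) := by
  unfold Pre_segregateElements; infer_instance

def pvWitness_segregateElements : List Int × Int := ([3, -1, 2, 0], 4)

def Spec_segregateElements (arr : List Int) (n : Int) (out : List Int) : Prop := out = segregateElements_alt arr n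
instance (arr : List Int) (n : Int) (out : List Int) : Decidable (Spec_segregateElements arr n out) := by unfold Spec_segregateElements; infer_instance

-- ===== CLAIM (what is proved, stated in full; the proofs are below) =====
def Claim_equal_segregateElements : Prop := ∀ (arr : List Int) (n : Int), Dom_segregateElements arr n → Pre_segregateElements arr n → Spec_segregateElements arr n (segregateElements arr n)

-- ===== LEMMAS AND PROOFS =====

-- A's partition loop produces the two sign-filters appended to the accumulators.
theorem partition_foldl (arr a b : List Int) :
    arr.foldl (fun (p : List Int × List Int) i =>
        if 0 < i then (p.1 ++ [i], p.2) else (p.1, p.2 ++ [i])) (a, b)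
      = (a ++ arr.filter (fun i => decide (0 < i)),
         b ++ arr.filter (fun i => !decide (0 < i))) := by
  induction arr generalizing a b with
  | nil => simp
  | cons x t ih =>
    by_cases hx : 0 < x <;> simp [List.foldl_cons, hx, ih]

-- inserting a positive x into (P ++ N) (P positive, N non-positive) lands between them
theorem insertBy_pos (P N : List Int) (x : Int) (hx : ¬ x ≤ 0)
    (hP : ∀ y ∈ P, ¬ y ≤ 0) (hN : ∀ y ∈ N, y ≤ 0) :
    PySem.List.insertBy
        (fun a b => decide ((decide (a ≤ 0) : Bool) < (decide (b ≤ 0) : Bool))) x (P ++ N)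
      = P ++ [x] ++ N := by
  induction P with
  | nil =>
    cases N with
    | nil => simp [PySem.List.insertBy]
    | cons m t =>
      have hm : m ≤ 0 := hN m (by simp)
      simp [PySem.List.insertBy, hx, hm]
  | cons p P' ih =>
    have hp : ¬ p ≤ 0 := hP p (by simp)
    have := ih (fun y hy => hP y (by simp [hy]))
    simp [PySem.List.insertBy, hx, hp, this]

-- main invariant of the insertion-sort fold with the boolean key
theorem sort_fold_invariant (arr P N : List Int)
    (hP : ∀ y ∈ P, ¬ y ≤ 0) (hN : ∀ y ∈ N, y ≤ 0) :
    arr.foldl (fun acc x =>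
        PySem.List.insertBy
          (fun a b => decide ((decide (a ≤ 0) : Bool) < (decide (b ≤ 0) : Bool))) x acc)
        (P ++ N)
      = (P ++ arr.filter (fun i => decide (0 < i))) ++ (N ++ arr.filter (fun i => !decide (0 < i))) := by
  induction arr generalizing P N with
  | nil => simp
  | cons x t ih =>
    by_cases hx : x ≤ 0
    · have hstep : PySem.List.insertBy
          (fun a b => decide ((decide (a ≤ 0) : Bool) < (decide (b ≤ 0) : Bool))) x (P ++ N)
          = (P ++ N) ++ [x] := by
        apply PySem.List.insertBy_of_forall_not_before
        intro y _
        simp [hx]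
      have := ih P (N ++ [x]) hP (by
        intro y hy
        rcases List.mem_append.1 hy with h | h
        · exact hN y h
        · simp at h; omega)
      rw [List.foldl_cons, hstep, List.append_assoc, this]
      simp [show ¬ (0:Int) < x by omega]
    · have hstep := insertBy_pos P N x hx hP hN
      have := ih (P ++ [x]) N (by
        intro y hy
        rcases List.mem_append.1 hy with h | h
        · exact hP y h
        · simp at h; omega) hN
      rw [List.foldl_cons, hstep, this]
      simp [show (0:Int) < x by omega]

-- the stable boolean-key sort is exactly the positives-then-nonpositives partition
theorem sorted_bool_key (arr : List Int) :
    PySem.List.sorted arr (fun x => decide (x ≤ 0))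
      = arr.filter (fun i => decide (0 < i)) ++ arr.filter (fun i => !decide (0 < i)) := by
  rw [PySem.List.sorted_eq_foldl_insertBy]
  have := sort_fold_invariant arr [] [] (by simp) (by simp)
  simpa using this

-- ===== VERDICT (by name: the statement is the Claim_ definition above) =====
theorem segregateElements_spec : Claim_equal_segregateElements := by
  intro arr n _ _
  unfold Spec_segregateElements segregateElements segregateElements_alt
  rw [sorted_bool_key, partition_foldl]
  simp
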